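-- pv_equiv track=rewrite | github.com/gwrxuk/QNLPDataset | jieba_segmentation.py | generate_vocabulary_analysis
-- ===== SOURCE A (Python) =====
-- from collections import Counter
--
-- def generate_vocabulary_analysis(all_results):
--     """生成詞彙統計分析"""
--     all_words = []
--     field_word_counts = {}
--
--     for result in all_results:
--         if result['words_list']:
--             words = [w.strip() for w in result['words_list'].split(',') if w.strip()]
--             all_words.extend(words)
--
--             field = result['field']
--             if field not in field_word_counts:
--                 field_word_counts[field] = []
--             field_word_counts[field].extend(words)
--
--     # 整體詞頻統計
--     word_freq = Counter(all_words)
--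
--     # 各欄位詞頻統計
--     field_freq = {}
--     for field, words in field_word_counts.items():
--         field_freq[field] = Counter(words)
--
--     return word_freq, field_freq
-- ===== SOURCE B (Python) =====
-- from collections import Counter
--
-- def generate_vocabulary_analysis(all_results):
--     """生成詞彙統計分析 — flatten to a (field, word) token stream, then count each
--     distinct key by scanning (dict.fromkeys + list.count), no incremental accumulation."""
--     active = [r for r in all_results if r['words_list']]
--     tokens = [(r['field'], w.strip())
--               for r in active
--               for w in r['words_list'].split(',')
--               if w.strip()]
--     words = [w for _, w in tokens]
--     word_freq = Counter({w: words.count(w) for w in dict.fromkeys(words)})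
--     field_freq = {}
--     for f in dict.fromkeys(r['field'] for r in active):
--         fw = [w for g, w in tokens if g == f]
--         field_freq[f] = Counter({w: fw.count(w) for w in dict.fromkeys(fw)})
--     return word_freq, field_freq
-- ===== Notes on version B (the rewrite author's own statement) =====
-- stated objective: alternative
-- what changed: Replaces A's incremental accumulation (extend lists per field, then build Counters in a second loop) by a flatten-then-count-by-scan algorithm: flatten everything once into a (field, word) token stream, then for each distinct word/field (dict.fromkeys) compute its count directly with list.count over the stream, grouping a field's words by filtering the stream.
import Mathlib
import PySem

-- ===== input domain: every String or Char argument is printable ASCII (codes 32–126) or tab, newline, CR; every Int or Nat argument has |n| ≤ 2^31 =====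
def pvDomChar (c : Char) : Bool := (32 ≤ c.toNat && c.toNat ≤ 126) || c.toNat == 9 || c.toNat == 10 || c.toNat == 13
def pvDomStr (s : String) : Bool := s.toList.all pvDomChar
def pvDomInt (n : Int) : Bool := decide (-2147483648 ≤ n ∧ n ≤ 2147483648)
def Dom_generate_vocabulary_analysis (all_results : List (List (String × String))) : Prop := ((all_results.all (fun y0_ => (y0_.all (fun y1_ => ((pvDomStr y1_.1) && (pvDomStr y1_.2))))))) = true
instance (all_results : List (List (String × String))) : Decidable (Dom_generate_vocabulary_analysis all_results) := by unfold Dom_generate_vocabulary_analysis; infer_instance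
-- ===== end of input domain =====

-- B replaces A's incremental accumulation (per-field word lists + a second Counter-building loop)
-- by a flatten-then-count-by-scan algorithm: one flat (field, word) token stream, counts computed
-- per distinct key by scanning it (objective: alternative — same task, declarative counting stage).

-- ===== PORT A =====

-- [w.strip() for w in s.split(',') if w.strip()] ; split? "," is always `some` since "," ≠ ""
def gvaWords (s : String) : List String :=
  (((PySem.Str.split? s ",").getD []).map PySem.Str.strip).filter (fun w => w ≠ "")

-- the body of A's main loop: if result['words_list'] is truthy, extend all_words and
-- field_word_counts[field] (created empty first if absent) with the stripped words.
-- result['words_list'] / result['field'] are modelled by Dict.ofList + getD; on inputs where the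
-- key is missing Python raises KeyError — those inputs are excluded by Pre_, so the default is never
-- the value actually claimed about.
def gvaStep (st : List String × PySem.Dict String (List String)) (r : List (String × String)) :
    List String × PySem.Dict String (List String) :=
  let d := PySem.Dict.ofList r
  let wl := d.getD "words_list" ""
  if wl ≠ "" then
    let words := gvaWords wl
    let fld := d.getD "field" ""
    ((st.1 ++ words),
     (st.2.setdefault fld []).modify fld [] (fun ws => ws ++ words))
  else st

-- the main loop of A: accumulates all_words and field_word_counts (lists of words per field)
def gvaLoopA (all_results : List (List (String × String))) :
    List String × PySem.Dict String (List String) :=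
  all_results.foldl gvaStep ([], PySem.Dict.empty)

def generate_vocabulary_analysis (all_results : List (List (String × String))) :
    (List (String × Int)) × (List (String × List (String × Int))) :=
  let st := gvaLoopA all_results
  -- word_freq = Counter(all_words)
  let word_freq := PySem.Dict.counter st.1
  -- field_freq = {}; for field, words in field_word_counts.items(): field_freq[field] = Counter(words)
  let field_freq := st.2.items.foldl
    (fun ff p => ff.insert p.1 (PySem.Dict.counter p.2)) PySem.Dict.empty
  (word_freq.items, field_freq.items.map (fun p => (p.1, p.2.items)))

-- ===== PORT B =====

-- active = [r for r in all_results if r['words_list']]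
def gvaActive (all_results : List (List (String × String))) : List (List (String × String)) :=
  all_results.filter (fun r => (PySem.Dict.ofList r).getD "words_list" "" ≠ "")

-- r['field']
def gvaField (r : List (String × String)) : String :=
  (PySem.Dict.ofList r).getD "field" ""

-- tokens = [(r['field'], w.strip()) for r in active for w in r['words_list'].split(',') if w.strip()]
def gvaTokens (all_results : List (List (String × String))) : List (String × String) :=
  (gvaActive all_results).flatMap (fun r =>
    (gvaWords ((PySem.Dict.ofList r).getD "words_list" "")).map (fun w => (gvaField r, w)))

def generate_vocabulary_analysis_alt (all_results : List (List (String × String))) :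
    (List (String × Int)) × (List (String × List (String × Int))) :=
  let tokens := gvaTokens all_results
  -- words = [w for _, w in tokens]
  let words := tokens.map (fun t => t.2)
  -- Counter({w: words.count(w) for w in dict.fromkeys(words)})
  let word_freq := (PySem.List.dedup words).map (fun w => (w, (words.count w : Int)))
  -- for f in dict.fromkeys(r['field'] for r in active): fw = [w for g, w in tokens if g == f]; …
  let field_freq := (PySem.List.dedup ((gvaActive all_results).map gvaField)).map (fun f =>
    let fw := (tokens.filter (fun t => t.1 == f)).map (fun t => t.2)
    (f, (PySem.List.dedup fw).map (fun w => (w, (fw.count w : Int)))))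
  (word_freq, field_freq)

-- ===== PRECONDITION & SPEC =====

-- Pre_ excludes exactly the inputs where Python A raises KeyError: every result must have the key
-- 'words_list', and, when its value is truthy (non-empty), the key 'field' as well.
def Pre_generate_vocabulary_analysis (all_results : List (List (String × String))) : Prop :=
  ∀ r ∈ all_results,
    (PySem.Dict.ofList r).contains "words_list" = true ∧
    ((PySem.Dict.ofList r).getD "words_list" "" ≠ "" →
      (PySem.Dict.ofList r).contains "field" = true)

instance (all_results : List (List (String × String))) : Decidable (Pre_generate_vocabulary_analysis all_results) := by unfold Pre_generate_vocabulary_analysis; infer_instance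

def pvWitness_generate_vocabulary_analysis : (List (List (String × String))) :=
  [[("words_list", "ai, data, ai"), ("field", "tech")],
   [("words_list", ""), ("field", "bio")],
   [("words_list", " ,x"), ("field", "bio")]]

def Spec_generate_vocabulary_analysis (all_results : List (List (String × String))) (out : (List (String × Int)) × (List (String × List (String × Int)))) : Prop := out = generate_vocabulary_analysis_alt all_results
instance (all_results : List (List (String × String))) (out : (List (String × Int)) × (List (String × List (String × Int)))) : Decidable (Spec_generate_vocabulary_analysis all_results out) := by unfold Spec_generate_vocabulary_analysis; infer_instance

-- ===== CLAIM =====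
def Claim_equal_generate_vocabulary_analysis : Prop := ∀ (all_results : List (List (String × String))), Dom_generate_vocabulary_analysis all_results → Pre_generate_vocabulary_analysis all_results → Spec_generate_vocabulary_analysis all_results (generate_vocabulary_analysis all_results)

-- ===== LEMMAS AND PROOFS =====

-- keys after one truthy step: the field is add-ed (Python-set style) to the key list
lemma gvaStep_keys (st : List String × PySem.Dict String (List String))
    (fld : String) (words : List String) :
    ((st.2.setdefault fld []).modify fld [] (fun ws => ws ++ words)).keys
      = PySem.Set.add st.2.keys fld := by
  rw [PySem.Dict.keys_modify]
  by_cases hc : st.2.contains fld = true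
  · rw [PySem.Dict.keys_insert_of_contains _ _ (by
      rw [PySem.Dict.contains_setdefault]; simp [hc]),
      PySem.Dict.keys_setdefault, if_pos hc, PySem.Set.add]
    rw [PySem.Dict.contains_eq_decide_mem_keys] at hc
    simp at hc
    simp [hc]
  · have hc' : st.2.contains fld = false := by simpa using hc
    rw [PySem.Dict.keys_insert_of_contains _ _ (by
      rw [PySem.Dict.contains_setdefault]; simp),
      PySem.Dict.keys_setdefault, if_neg (by simp [hc']), PySem.Set.add]
    rw [PySem.Dict.contains_eq_decide_mem_keys] at hc'
    simp at hc'
    simp [hc']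

-- the loop invariant of A, stated against B's token stream, for an arbitrary start state
lemma gvaLoopA_inv (rs : List (List (String × String)))
    (st : List String × PySem.Dict String (List String)) (hnd : st.2.keys.Nodup) :
    (rs.foldl gvaStep st).1 = st.1 ++ (gvaTokens rs).map (fun t => t.2) ∧
    (rs.foldl gvaStep st).2.keys = PySem.Set.update st.2.keys ((gvaActive rs).map gvaField) ∧
    (rs.foldl gvaStep st).2.keys.Nodup ∧
    ∀ f, (rs.foldl gvaStep st).2.getD f []
      = st.2.getD f [] ++ ((gvaTokens rs).filter (fun t => t.1 == f)).map (fun t => t.2) := by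
  induction rs generalizing st with
  | nil =>
    refine ⟨by simp [gvaTokens, gvaActive], ?_, hnd, by simp [gvaTokens, gvaActive]⟩
    simp [gvaActive, PySem.Set.update]
  | cons r rest ih =>
    by_cases hwl : (PySem.Dict.ofList r).getD "words_list" "" ≠ ""
    · have hact : gvaActive (r :: rest) = r :: gvaActive rest := by
        simp [gvaActive, hwl]
      have htok : gvaTokens (r :: rest)
          = (gvaWords ((PySem.Dict.ofList r).getD "words_list" "")).map (fun w => (gvaField r, w))
            ++ gvaTokens rest := by
        simp [gvaTokens, hact]
      have hstep : (r :: rest).foldl gvaStep st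
          = rest.foldl gvaStep
              (st.1 ++ gvaWords ((PySem.Dict.ofList r).getD "words_list" ""),
               (st.2.setdefault (gvaField r) []).modify (gvaField r) []
                 (fun ws => ws ++ gvaWords ((PySem.Dict.ofList r).getD "words_list" ""))) := by
        simp only [List.foldl_cons, gvaStep, if_pos hwl]; rfl
      have hnd1 : ((st.2.setdefault (gvaField r) []).modify (gvaField r) []
          (fun ws => ws ++ gvaWords ((PySem.Dict.ofList r).getD "words_list" ""))).keys.Nodup := by
        rw [gvaStep_keys]; exact PySem.Set.nodup_add _ _ hnd
      obtain ⟨ih1, ih2, ih3, ih4⟩ := ih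
        (st.1 ++ gvaWords ((PySem.Dict.ofList r).getD "words_list" ""),
         (st.2.setdefault (gvaField r) []).modify (gvaField r) []
           (fun ws => ws ++ gvaWords ((PySem.Dict.ofList r).getD "words_list" ""))) hnd1
      refine ⟨?_, ?_, by rw [hstep]; exact ih3, ?_⟩
      · rw [hstep, ih1, htok]; simp
      · rw [hstep, ih2, gvaStep_keys, hact]
        simp [PySem.Set.update]
      · intro f
        rw [hstep, ih4 f, htok]
        simp only [List.filter_append, List.map_append, ← List.append_assoc]
        congr 1
        rw [PySem.Dict.getD_modify]
        by_cases hfe : f = gvaField r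
        · subst hfe
          rw [if_pos rfl, PySem.Dict.getD_setdefault_self]
          congr 1
          simp [List.filter_map, Function.comp_def]
        · rw [if_neg hfe]
          have hflt : ((gvaWords ((PySem.Dict.ofList r).getD "words_list" "")).map
              (fun w => (gvaField r, w))).filter (fun t => t.1 == f) = [] := by
            rw [List.filter_map]
            have hcomp : (fun t => t.1 == f) ∘ (fun w => ((gvaField r, w) : String × String))
                = fun _ => false := by
              funext w; simp [Ne.symm hfe]
            rw [hcomp]; simp
          rw [hflt]
          simp [PySem.Dict.getD_eq_get?_getD, PySem.Dict.get?_setdefault_of_ne _ _ hfe]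
    · have hwl' : ¬ ((PySem.Dict.ofList r).getD "words_list" "" ≠ "") := hwl
      have hact : gvaActive (r :: rest) = gvaActive rest := by
        simp [gvaActive, hwl']
      have htok : gvaTokens (r :: rest) = gvaTokens rest := by simp [gvaTokens, hact]
      have hstep : (r :: rest).foldl gvaStep st = rest.foldl gvaStep st := by
        simp only [List.foldl_cons, gvaStep, if_neg hwl']
      obtain ⟨ih1, ih2, ih3, ih4⟩ := ih st hnd
      exact ⟨by rw [hstep, ih1, htok], by rw [hstep, ih2, hact], by rw [hstep]; exact ih3,
        fun f => by rw [hstep, ih4 f, htok]⟩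

lemma gvaLoopA_spec (all_results : List (List (String × String))) :
    (gvaLoopA all_results).1 = (gvaTokens all_results).map (fun t => t.2) ∧
    (gvaLoopA all_results).2.keys = PySem.Set.ofList ((gvaActive all_results).map gvaField) ∧
    (gvaLoopA all_results).2.keys.Nodup ∧
    ∀ f, (gvaLoopA all_results).2.getD f []
      = ((gvaTokens all_results).filter (fun t => t.1 == f)).map (fun t => t.2) := by
  obtain ⟨h1, h2, h3, h4⟩ := gvaLoopA_inv all_results ([], PySem.Dict.empty)
    (by simp [PySem.Dict.keys_empty])
  unfold gvaLoopA
  refine ⟨by simpa using h1, ?_, h3, fun f => by simpa [PySem.Dict.getD_empty] using h4 f⟩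
  rw [h2]
  simp [PySem.Set.update, PySem.Set.ofList_eq_foldl, PySem.Dict.keys_empty]

-- ===== VERDICT =====
theorem generate_vocabulary_analysis_spec : Claim_equal_generate_vocabulary_analysis := by
  intro all_results _ _
  unfold Spec_generate_vocabulary_analysis
  unfold generate_vocabulary_analysis generate_vocabulary_analysis_alt
  obtain ⟨h1, h2, h3, h4⟩ := gvaLoopA_spec all_results
  refine Prod.ext ?_ ?_
  · simp only [h1, PySem.Dict.items_counter, PySem.List.dedup_eq_ofList]
  · simp only []
    rw [PySem.Dict.items_foldl_insert_fresh _ _ _ _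
        (fun a _ => PySem.Dict.contains_empty _)
        (by rw [show (gvaLoopA all_results).2.items.map (·.1) = (gvaLoopA all_results).2.keys from rfl]; exact h3)]
    rw [show (PySem.Dict.empty : PySem.Dict String (PySem.Dict String Int)).items = [] from rfl,
      List.nil_append,
      PySem.Dict.items_eq_map_keys _ h3 [], h2]
    simp only [List.map_map, PySem.List.dedup_eq_ofList]
    refine List.map_congr_left (fun k _ => ?_)
    simp [h4 k, PySem.Dict.items_counter]
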